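-- pv_equiv track=rewrite | github.com/nkitchen/aoc2023 | day14.py | signature
-- ===== SOURCE A (Python) =====
-- def signature(grid):
--     m = len(grid)
--     n = len(grid[0])
--     sig = 0
--     for i in range(m):
--         for j in range(n):
--             sig <<= 1
--             if grid[i][j] == 'O':
--                 sig += 1
--     return sig
-- ===== SOURCE B (Python) =====
-- def signature(grid):
--     n = len(grid[0])
--     bits = ''.join('1' if c == 'O' else '0' for row in grid for c in row[:n])
--     return int(bits, 2) if bits else 0
-- ===== Notes on version B (the rewrite author's own statement) =====
-- stated objective: idiomatic
-- what changed: Instead of a running shift-and-add accumulator over nested index loops, B materializes the whole bit pattern as a binary string ('1' for 'O', '0' otherwise, rows truncated to the first row's width) and parses it in one step with int(bits, 2).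
import Mathlib
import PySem

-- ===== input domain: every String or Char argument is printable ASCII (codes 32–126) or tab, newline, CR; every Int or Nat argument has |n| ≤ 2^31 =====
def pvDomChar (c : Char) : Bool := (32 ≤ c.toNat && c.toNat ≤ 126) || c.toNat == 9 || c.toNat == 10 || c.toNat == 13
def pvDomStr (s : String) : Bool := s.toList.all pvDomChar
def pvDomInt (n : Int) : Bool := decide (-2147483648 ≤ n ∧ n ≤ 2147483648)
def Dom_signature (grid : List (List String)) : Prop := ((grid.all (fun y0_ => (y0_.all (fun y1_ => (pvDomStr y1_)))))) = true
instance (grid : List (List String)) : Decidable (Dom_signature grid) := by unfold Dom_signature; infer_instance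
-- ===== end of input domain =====

-- B replaces the running shift-and-add accumulator over nested index loops by
-- materializing the whole bit pattern as a binary string and parsing it with int(bits, 2);
-- idiomatic, same cost.

-- ===== PORT A =====
-- 'sig <<= 1' is sig * 2 (exact on Int); grid[i][j] via pyGetD (in range under Pre_).
def signature (grid : List (List String)) : Int :=
  let m : Int := grid.length
  let n : Int := (PySem.List.pyGetD grid 0 []).length
  (PySem.List.pyRange 0 m 1).foldl (fun sig i =>
    (PySem.List.pyRange 0 n 1).foldl (fun sig j =>
      let sig := sig * 2
      if PySem.List.pyGetD (PySem.List.pyGetD grid i []) j "" = "O" then sig + 1 else sig)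
      sig) 0

-- ===== PORT B =====
-- row[:n] is PySem.List.slice; int(bits, 2) is ported by hand as the standard
-- most-significant-first binary parse — exact here because bits consists only of
-- the characters '0' and '1' that B itself produced (and B guards the empty string).
def signature_alt (grid : List (List String)) : Int :=
  let n : Int := (PySem.List.pyGetD grid 0 []).length
  let bits : List Char := grid.flatMap (fun row =>
    (PySem.List.slice row none (some n)).map (fun c => if c = "O" then '1' else '0'))
  if bits = [] then 0
  else bits.foldl (fun a c => a * 2 + (if c = '1' then 1 else 0)) 0

-- ===== PRECONDITION & SPEC =====
-- Pre_ excludes exactly the inputs where Python A raises IndexError: the empty grid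
-- (grid[0]) and grids with a row shorter than the first row (grid[i][j], j < n).
def Pre_signature (grid : List (List String)) : Prop :=
  grid ≠ [] ∧ ∀ row ∈ grid, (grid.headD []).length ≤ row.length
instance (grid : List (List String)) : Decidable (Pre_signature grid) := by
  unfold Pre_signature; infer_instance
def pvWitness_signature : List (List String) := [["O", "."], [".", "O"]]
def Spec_signature (grid : List (List String)) (out : Int) : Prop := out = signature_alt grid
instance (grid : List (List String)) (out : Int) : Decidable (Spec_signature grid out) := by
  unfold Spec_signature; infer_instance

-- ===== CLAIM (what is proved, stated in full; the proofs are below) =====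
def Claim_equal_signature : Prop := ∀ (grid : List (List String)),
  Dom_signature grid → Pre_signature grid → Spec_signature grid (signature grid)

-- ===== LEMMAS AND PROOFS =====

/-- A's inner index loop over a row equals the plain shift-and-add fold over its
first `n0` cells. -/
theorem pvInner (row : List String) (n0 : Nat) (h : n0 ≤ row.length) (a : Int) :
    (PySem.List.pyRange 0 (n0 : Int) 1).foldl (fun sig j =>
        let s := sig * 2
        if PySem.List.pyGetD row j "" = "O" then s + 1 else s) a
      = (row.take n0).foldl (fun s c => if c = "O" then s * 2 + 1 else s * 2) a := by
  induction n0 generalizing a with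
  | zero => simp [PySem.List.pyRange_one_eq_nil]
  | succ k ih =>
    have hk : k ≤ row.length := Nat.le_of_succ_le h
    have hget : PySem.List.pyGetD row (k : Int) "" = row[k]'(Nat.lt_of_succ_le h) := by
      rw [PySem.List.pyGetD_natCast]
      simp [List.getD]
      rw [List.getElem?_eq_getElem (Nat.lt_of_succ_le h)]
      rfl
    rw [show ((k + 1 : Nat) : Int) = (k : Int) + 1 by push_cast; ring,
      PySem.List.pyRange_one_succ_right (by positivity),
      List.foldl_append, ih hk,
      List.take_add_one, List.foldl_append]
    rw [List.getElem?_eq_getElem (Nat.lt_of_succ_le h)]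
    simp [hget]

/-- B's bit character fold equals A's shift-and-add fold over the same cells. -/
theorem pvBitFold (cells : List String) (a : Int) :
    (cells.map (fun c => if c = "O" then '1' else '0')).foldl
        (fun a c => a * 2 + (if c = '1' then 1 else 0)) a
      = cells.foldl (fun s c => if c = "O" then s * 2 + 1 else s * 2) a := by
  rw [List.foldl_map]
  refine PySem.List.foldl_congr_mem _ _ _ _ (fun a c _ => ?_)
  by_cases hc : c = "O" <;> simp [hc]

-- ===== VERDICT (by name: the statement is the Claim_ definition above) =====
theorem signature_spec : Claim_equal_signature := by
  intro grid _ hpre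
  obtain ⟨hne, hlen⟩ := hpre
  unfold Spec_signature signature signature_alt
  simp only []
  set n0 : Nat := (PySem.List.pyGetD grid 0 []).length with hn0
  -- the guard is harmless: the fold from 0 over [] is 0
  have hguard : ∀ (bits : List Char),
      (if bits = [] then (0 : Int)
        else bits.foldl (fun a c => a * 2 + (if c = '1' then 1 else 0)) 0)
      = bits.foldl (fun a c => a * 2 + (if c = '1' then 1 else 0)) 0 := by
    intro bits; split_ifs with hb <;> simp [hb]
  rw [hguard]
  -- outer loop of A: index loop over grid = fold over grid's rows
  rw [PySem.List.foldl_pyRange_zero_pyGetD' grid ([] : List String)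
    (fun sig row => (PySem.List.pyRange 0 (n0 : Int) 1).foldl (fun sig j =>
      let s := sig * 2
      if PySem.List.pyGetD row j "" = "O" then s + 1 else s) sig) 0]
  -- rows have at least n0 cells
  have hrow : ∀ row ∈ grid, n0 ≤ row.length := by
    intro row hr
    have : PySem.List.pyGetD grid 0 [] = grid.headD [] := by
      cases grid with
      | nil => simp at hne
      | cons r rs =>
        rw [show (0:Int) = ((0:Nat):Int) from rfl, PySem.List.pyGetD_natCast]
        simp [List.getD]
    rw [hn0, this]; exact hlen row hr
  -- replace each inner index loop by a fold over the truncated row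
  rw [PySem.List.foldl_congr_mem grid _ (fun sig row =>
    (row.take n0).foldl (fun s c => if c = "O" then s * 2 + 1 else s * 2) sig) 0
    (fun a row hr => pvInner row n0 (hrow row hr) a)]
  -- B's side: flatten, slices are takes, bit chars fold back to the same fold
  have hslice : ∀ row : List String,
      PySem.List.slice row none (some (n0 : Int)) = row.take n0 :=
    fun row => PySem.List.slice_to_natCast row n0
  simp only [hslice]
  rw [← List.foldl_flatMap]
  rw [show grid.flatMap (fun row => (row.take n0).map (fun c => if c = "O" then '1' else '0'))
      = (grid.flatMap (fun row => row.take n0)).map (fun c => if c = "O" then '1' else '0') by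
    simp [List.map_flatMap]]
  rw [pvBitFold, List.foldl_flatMap]
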